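-- pv_equiv track=rewrite | github.com/Flu/advent-of-code-2025 | day3/main.py | largest_joltage
-- ===== SOURCE A (Python) =====
-- def largest_joltage(joltages: [int], radix: int = 2) -> int:
--     max_num = [-1]*(radix)
--
--     for r in range(radix):
--         if r == 0:
--             max_num[0] = 0
--         else:
--             max_num[r] = max_num[r-1] + 1
--
--         for index in range(max_num[r], len(joltages) - (radix - (r + 1))):
--             if joltages[index] > joltages[max_num[r]]:
--                 max_num[r] = index
--
--     final_joltage = 0
--     max_num = max_num[::-1]
--     for r in range(radix):
--         final_joltage += joltages[max_num[r]] * 10**r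
--     return final_joltage
-- ===== SOURCE B (Python) =====
-- def largest_joltage(joltages: [int], radix: int = 2) -> int:
--     # Monotonic-stack selection of the lexicographically largest index subsequence,
--     # then the same power-of-10 weighting as the original.
--     n = len(joltages)
--     stack = []
--     for i, v in enumerate(joltages):
--         while stack and joltages[stack[-1]] < v and len(stack) - 1 + (n - i) >= radix:
--             stack.pop()
--         if len(stack) < radix:
--             stack.append(i)
--     final_joltage = 0
--     for r in range(radix):
--         final_joltage += joltages[stack[radix - 1 - r]] * 10**r
--     return final_joltage
-- ===== Notes on version B (the rewrite author's own statement) =====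
-- stated objective: alternative
-- what changed: Replaced the nested windowed-argmax greedy (one rescan of the remaining list per output digit, O(n*radix)) with a single-pass monotonic-stack selection of the same index subsequence (O(n+radix)), keeping the final power-of-10 weighting loop.
import Mathlib
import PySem

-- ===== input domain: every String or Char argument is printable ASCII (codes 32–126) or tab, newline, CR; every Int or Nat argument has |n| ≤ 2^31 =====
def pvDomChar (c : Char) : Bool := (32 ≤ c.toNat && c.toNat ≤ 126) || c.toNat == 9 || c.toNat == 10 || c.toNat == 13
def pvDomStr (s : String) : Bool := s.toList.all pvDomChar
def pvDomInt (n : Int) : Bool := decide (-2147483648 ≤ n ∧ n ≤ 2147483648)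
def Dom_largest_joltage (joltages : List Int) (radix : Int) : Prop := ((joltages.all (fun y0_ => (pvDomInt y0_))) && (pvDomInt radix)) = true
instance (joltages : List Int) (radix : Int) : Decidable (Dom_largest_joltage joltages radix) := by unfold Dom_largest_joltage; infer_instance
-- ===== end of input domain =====

-- B replaces A's per-digit window rescans with one monotonic-stack pass selecting the same
-- indices (alternative algorithm, same final weighting loop).

-- ===== PORT A =====
-- body of A's inner 'for index in range(...)' loop
def ljScanStep (joltages : List Int) (cur index : Int) : Int :=
  if PySem.List.pyGetD joltages index 0 > PySem.List.pyGetD joltages cur 0 then index else cur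

-- body of A's outer 'for r in range(radix)' loop: compute this round's start, rescan the window
def ljAStep (joltages : List Int) (radix : Int) (ms : List Int) (r : Int) : List Int :=
  let start : Int := if r = 0 then 0 else PySem.List.pyGetD ms (r - 1) (-1) + 1
  ms ++ [(PySem.List.pyRange start ((joltages.length : Int) - (radix - (r + 1))) 1).foldl
           (ljScanStep joltages) start]

def largest_joltage (joltages : List Int) (radix : Int) : Int :=
  -- max_num is built left to right (Python preallocates [-1]*radix and assigns slot r at step r)
  let msFinal := (PySem.List.pyRange 0 radix 1).foldl (ljAStep joltages radix) []
  -- max_num = max_num[::-1]  (full reverse slice), then the weighting loop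
  (PySem.List.pyRange 0 radix 1).foldl (fun acc r =>
      acc + PySem.List.pyGetD joltages (PySem.List.pyGetD msFinal.reverse r 0) 0 * 10 ^ r.toNat) 0

-- ===== PORT B =====
-- the 'while stack and ... : stack.pop()' loop; the Lean stack keeps Python's stack reversed
-- (head = top of stack = end of the Python list)
def ljPop (joltages : List Int) (radix n i v : Int) : List Int → List Int
  | [] => []
  | t :: rest =>
      if PySem.List.pyGetD joltages t 0 < v ∧ ((t :: rest).length : Int) - 1 + (n - i) ≥ radix then
        ljPop joltages radix n i v rest
      else t :: rest

-- body of B's 'for i, v in enumerate(joltages)' loop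
def ljStep (joltages : List Int) (radix : Int) (st : List Int) (p : Int × Int) : List Int :=
  let st' := ljPop joltages radix (joltages.length : Int) p.1 p.2 st
  if (st'.length : Int) < radix then p.1 :: st' else st'

def largest_joltage_alt (joltages : List Int) (radix : Int) : Int :=
  let st := (PySem.List.enumerate joltages 0).foldl (ljStep joltages radix) []
  -- st.reverse is the Python stack (indices in increasing order); stack[radix-1-r]
  (PySem.List.pyRange 0 radix 1).foldl (fun acc r =>
      acc + PySem.List.pyGetD joltages (PySem.List.pyGetD st.reverse (radix - 1 - r) 0) 0 * 10 ^ r.toNat) 0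

-- ===== PRECONDITION & SPEC =====
-- A raises IndexError exactly when radix > len(joltages) (the final weighting loop then reads
-- past the end); Pre_ admits everything else, including radix ≤ 0 (both return 0).
def Pre_largest_joltage (joltages : List Int) (radix : Int) : Prop :=
  radix ≤ (joltages.length : Int)
instance (joltages : List Int) (radix : Int) : Decidable (Pre_largest_joltage joltages radix) := by
  unfold Pre_largest_joltage; infer_instance

def pvWitness_largest_joltage : List Int × Int := ([3, 1, 4, 1], 2)

def Spec_largest_joltage (joltages : List Int) (radix : Int) (out : Int) : Prop := out = largest_joltage_alt joltages radix
instance (joltages : List Int) (radix : Int) (out : Int) : Decidable (Spec_largest_joltage joltages radix out) := by unfold Spec_largest_joltage; infer_instance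

-- ===== CLAIM (what is proved, stated in full; the proofs are below) =====
def Claim_equal_largest_joltage : Prop := ∀ (joltages : List Int) (radix : Int), Dom_largest_joltage joltages radix → Pre_largest_joltage joltages radix → Spec_largest_joltage joltages radix (largest_joltage joltages radix)

-- ===== LEMMAS AND PROOFS =====

-- value of xs at (nonnegative) index j, as both ports read it
def ljVal (xs : List Int) (j : Int) : Int := PySem.List.pyGetD xs j 0

-- A's inner loop as a function: scan of xs over [s, e) starting from candidate s
def ljScan (xs : List Int) (s e : Int) : Int :=
  (PySem.List.pyRange s e 1).foldl (ljScanStep xs) s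

-- the greedy index selection A computes: with fuel k+1 the current window ends at len - k
def gsel (xs : List Int) : Nat → Int → List Int
  | 0, _ => []
  | k + 1, s =>
      let i := ljScan xs s ((xs.length : Int) - k)
      i :: gsel xs k (i + 1)

-- generic fold-relation lemma
theorem lj_foldl_rel {α β γ : Type} (l : List γ) (R : α → β → Prop) (F : α → γ → α) (G : β → γ → β)
    (a : α) (b : β) (hab : R a b) (h : ∀ a b x, x ∈ l → R a b → R (F a x) (G b x)) :
    R (l.foldl F a) (l.foldl G b) := by
  induction l generalizing a b with
  | nil => exact hab
  | cons x t ih =>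
      exact ih (F a x) (G b x) (h a b x (by simp) hab) (fun a b y hy => h a b y (by simp [hy]))

theorem ljScan_fold_inv (xs : List Int) (s : Int) :
    ∀ (d : Nat) (m e c : Int), (e - m).toNat = d → s ≤ c → c ≤ m →
    (∀ j, s ≤ j → j < m → ljVal xs j ≤ ljVal xs c) →
    (∀ j, s ≤ j → j < c → ljVal xs j < ljVal xs c) →
    (s ≤ (PySem.List.pyRange m e 1).foldl (ljScanStep xs) c ∧
     ((PySem.List.pyRange m e 1).foldl (ljScanStep xs) c = c ∨
        (PySem.List.pyRange m e 1).foldl (ljScanStep xs) c < e) ∧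
     (∀ j, s ≤ j → j < e →
        ljVal xs j ≤ ljVal xs ((PySem.List.pyRange m e 1).foldl (ljScanStep xs) c)) ∧
     (∀ j, s ≤ j → j < (PySem.List.pyRange m e 1).foldl (ljScanStep xs) c →
        ljVal xs j < ljVal xs ((PySem.List.pyRange m e 1).foldl (ljScanStep xs) c))) := by
  intro d
  induction d with
  | zero =>
      intro m e c hd hsc hcm hmax hstrict
      rw [PySem.List.pyRange_one_eq_nil (by omega)]
      refine ⟨hsc, Or.inl rfl, ?_, hstrict⟩
      intro j hj hje; exact hmax j hj (by omega)
  | succ d ih =>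
      intro m e c hd hsc hcm hmax hstrict
      have hme : m < e := by omega
      rw [PySem.List.pyRange_one_cons hme]
      simp only [List.foldl_cons]
      have hstep : ljScanStep xs c m = if ljVal xs m > ljVal xs c then m else c := rfl
      by_cases hgt : ljVal xs m > ljVal xs c
      · rw [hstep]; simp only [if_pos hgt]
        have h1 : ∀ j, s ≤ j → j < m + 1 → ljVal xs j ≤ ljVal xs m := by
          intro j hj hjm
          rcases lt_or_ge j m with h | h
          · exact le_of_lt (lt_of_le_of_lt (hmax j hj h) hgt)
          · have : j = m := by omega
            simp [this]
        have h2 : ∀ j, s ≤ j → j < m → ljVal xs j < ljVal xs m := by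
          intro j hj hjm; exact lt_of_le_of_lt (hmax j hj hjm) hgt
        obtain ⟨c1, c2, c3, c4⟩ := ih (m + 1) e m (by omega) (by omega) (by omega) h1 h2
        have c2' : List.foldl (ljScanStep xs) m (PySem.List.pyRange (m+1) e) = c ∨
            List.foldl (ljScanStep xs) m (PySem.List.pyRange (m+1) e) < e := by
          rcases c2 with h | h
          · right; omega
          · right; exact h
        exact ⟨c1, c2', c3, c4⟩
      · rw [hstep]; simp only [if_neg hgt]
        have h1 : ∀ j, s ≤ j → j < m + 1 → ljVal xs j ≤ ljVal xs c := by
          intro j hj hjm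
          rcases lt_or_ge j m with h | h
          · exact hmax j hj h
          · have : j = m := by omega
            subst this; omega
        obtain ⟨c1, c2, c3, c4⟩ := ih (m + 1) e c (by omega) hsc (by omega) h1 hstrict
        exact ⟨c1, c2, c3, c4⟩

theorem ljScan_inv (xs : List Int) (s e : Int) :
    (s ≤ ljScan xs s e ∧ (ljScan xs s e = s ∨ ljScan xs s e < e)) ∧
    (∀ j, s ≤ j → j < e → ljVal xs j ≤ ljVal xs (ljScan xs s e)) ∧
    (∀ j, s ≤ j → j < ljScan xs s e → ljVal xs j < ljVal xs (ljScan xs s e)) := by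
  obtain ⟨c1, c2, c3, c4⟩ := ljScan_fold_inv xs s (e - s).toNat s e s rfl le_rfl le_rfl
    (by intro j h1 h2; omega) (by intro j h1 h2; omega)
  exact ⟨⟨c1, c2⟩, c3, c4⟩

theorem gsel_length (xs : List Int) (k : Nat) (s : Int) : (gsel xs k s).length = k := by
  induction k generalizing s with
  | zero => rfl
  | succ k ih => simp [gsel, ih]

-- pyGetD at a nonnegative index is plain getD
theorem ljVal_nonneg (xs : List Int) (t : Int) (ht : 0 ≤ t) :
    ljVal xs t = xs.getD t.toNat 0 := by
  have h : t = ((t.toNat : Nat) : Int) := by omega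
  rw [ljVal, h, PySem.List.pyGetD_natCast]
  have : (max t 0).toNat = t.toNat := by omega
  simp [List.getD_eq_getElem?_getD, this]

-- value shift under drop
theorem ljVal_drop (xs : List Int) (m : Nat) (t : Int) (ht : 0 ≤ t) :
    ljVal (xs.drop m) t = ljVal xs (t + (m : Int)) := by
  rw [ljVal_nonneg _ _ ht, ljVal_nonneg _ _ (by omega)]
  have h1 : (t + (m : Int)).toNat = m + t.toNat := by omega
  rw [h1]
  simp [List.getD, List.getElem?_drop]

-- scan commutes with dropping a prefix
theorem ljScan_shift (xs : List Int) (m : Nat) (s e : Int) (hs : 0 ≤ s) :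
    ljScan xs (s + (m : Int)) (e + (m : Int)) = ljScan (xs.drop m) s e + (m : Int) := by
  have hrange : PySem.List.pyRange (s + (m : Int)) (e + (m : Int)) 1 =
      (PySem.List.pyRange s e 1).map (· + (m : Int)) := by
    rw [PySem.List.pyRange_one, PySem.List.pyRange_one, List.map_map]
    have he : e + (m : Int) - (s + (m : Int)) = e - s := by ring
    rw [he]
    apply List.map_congr_left
    intro k _
    simp
    ring
  rw [ljScan, ljScan, hrange, List.foldl_map]
  have hstep : ∀ (a b : Int) (x : Int), x ∈ PySem.List.pyRange s e 1 →
      (a = b + (m : Int) ∧ 0 ≤ b) →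
      (ljScanStep xs a (x + (m : Int)) = ljScanStep (xs.drop m) b x + (m : Int) ∧
        0 ≤ ljScanStep (xs.drop m) b x) := by
    intro a b x hx ⟨hab, hb⟩
    have hx0 : 0 ≤ x := by
      have := (PySem.List.mem_pyRange_one ).mp hx
      omega
    have hvx : PySem.List.pyGetD xs (x + (m : Int)) 0 = PySem.List.pyGetD (xs.drop m) x 0 :=
      (ljVal_drop xs m x hx0).symm
    have hvb : PySem.List.pyGetD xs (b + (m : Int)) 0 = PySem.List.pyGetD (xs.drop m) b 0 :=
      (ljVal_drop xs m b hb).symm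
    rw [ljScanStep, ljScanStep, hab, hvx, hvb]
    split
    · exact ⟨rfl, hx0⟩
    · exact ⟨rfl, hb⟩
  exact (lj_foldl_rel (PySem.List.pyRange s e 1)
    (fun a b => a = b + (m : Int) ∧ 0 ≤ b)
    (fun c i => ljScanStep xs c (i + (m : Int))) (ljScanStep (xs.drop m))
    (s + (m : Int)) s ⟨rfl, hs⟩ hstep).1

-- greedy selection commutes with dropping a prefix
theorem gsel_shift (xs : List Int) (m : Nat) (hm : m ≤ xs.length) (k : Nat) (s : Int) (hs : 0 ≤ s) :
    gsel xs k (s + (m : Int)) = (gsel (xs.drop m) k s).map (· + (m : Int)) := by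
  induction k generalizing s with
  | zero => simp [gsel]
  | succ k ih =>
      have hlen : ((xs.drop m).length : Int) = (xs.length : Int) - (m : Int) := by
        simp [List.length_drop]; omega
      have he : (xs.length : Int) - (k : Int) = (((xs.drop m).length : Int) - k) + (m : Int) := by
        omega
      rw [gsel, gsel]
      rw [he, ljScan_shift xs m s _ hs]
      have hscan := (ljScan_inv (xs.drop m) s (((xs.drop m).length : Int) - k)).1.1
      have harg : ljScan (xs.drop m) s (((xs.drop m).length : Int) - k) + (m : Int) + 1 =
          (ljScan (xs.drop m) s (((xs.drop m).length : Int) - k) + 1) + (m : Int) := by ring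
      rw [List.map_cons, harg, ih _ (by omega)]

-- last element of the accumulator list
theorem pyGetD_last (q : List Int) (x d : Int) :
    PySem.List.pyGetD (q ++ [x]) ((q.length : Int)) d = x := by
  rw [PySem.List.pyGetD_natCast]
  simp [List.getD_eq_getElem?_getD]

-- A's outer loop from round r on, accumulator ending in x, equals the greedy continuation
theorem lj_aloop (xs : List Int) (radix : Int) :
    ∀ (k : Nat) (r : Int) (q : List Int) (x : Int), 1 ≤ r → radix = r + k →
      (q.length : Int) + 1 = r →
      (PySem.List.pyRange r radix 1).foldl (ljAStep xs radix) (q ++ [x]) =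
        q ++ [x] ++ gsel xs k (x + 1) := by
  intro k
  induction k with
  | zero =>
      intro r q x hr hrad hq
      rw [PySem.List.pyRange_one_eq_nil (by omega)]
      simp [gsel]
  | succ k ih =>
      intro r q x hr hrad hq
      rw [PySem.List.pyRange_one_cons (by omega), List.foldl_cons]
      have hstep : ljAStep xs radix (q ++ [x]) r =
          (q ++ [x]) ++ [ljScan xs (x + 1) ((xs.length : Int) - k)] := by
        rw [ljAStep]
        have hr0 : ¬ (r = 0) := by omega
        simp only [if_neg hr0]
        have hq' : r - 1 = (q.length : Int) := by omega
        rw [hq', pyGetD_last]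
        have he : (xs.length : Int) - (radix - (r + 1)) = (xs.length : Int) - (k : Int) := by
          omega
        rw [he]
        rfl
      rw [hstep]
      rw [ih (r + 1) (q ++ [x]) (ljScan xs (x + 1) ((xs.length : Int) - k))
        (by omega) (by omega) (by simp; omega)]
      rw [gsel]
      simp [List.append_assoc]

-- A's max_num list is exactly the greedy selection
theorem lj_msFinal (xs : List Int) (radix : Int) :
    (PySem.List.pyRange 0 radix 1).foldl (ljAStep xs radix) [] = gsel xs radix.toNat 0 := by
  by_cases h : radix ≤ 0
  · rw [PySem.List.pyRange_one_eq_nil (by omega)]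
    have : radix.toNat = 0 := by omega
    rw [this]
    rfl
  · rw [PySem.List.pyRange_one_cons (by omega), List.foldl_cons]
    have hk : radix.toNat = (radix - 1).toNat + 1 := by omega
    have hstep : ljAStep xs radix [] 0 =
        [] ++ [ljScan xs 0 ((xs.length : Int) - ((radix - 1).toNat : Int))] := by
      rw [ljAStep]
      simp only []
      have he : (xs.length : Int) - (radix - (0 + 1)) =
          (xs.length : Int) - ((radix - 1).toNat : Int) := by omega
      rw [he]
      rfl
    rw [hstep]
    have h01 : (0 : Int) + 1 = 1 := by norm_num
    rw [h01]
    rw [lj_aloop xs radix ((radix - 1).toNat) 1 []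
      (ljScan xs 0 ((xs.length : Int) - ((radix - 1).toNat : Int))) (by omega) (by omega) (by simp)]
    rw [hk, gsel]
    simp

-- ===== stack side =====

theorem ljPop_subset (xs : List Int) (radix n i v : Int) :
    ∀ st t, t ∈ ljPop xs radix n i v st → t ∈ st := by
  intro st
  induction st with
  | nil => intro t h; simp [ljPop] at h
  | cons a rest ih =>
      intro t h
      rw [ljPop] at h
      split at h
      · exact List.mem_cons_of_mem a (ih t h)
      · exact h

theorem ljPop_all (xs : List Int) (radix n i v : Int) (hfeas : radix ≤ n - i) :
    ∀ st, (∀ t ∈ st, PySem.List.pyGetD xs t 0 < v) → ljPop xs radix n i v st = [] := by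
  intro st
  induction st with
  | nil => intro _; rfl
  | cons a rest ih =>
      intro h
      rw [ljPop]
      rw [if_pos ⟨h a (by simp), by simp; omega⟩]
      exact ih (fun t ht => h t (by simp [ht]))

-- a run with radix = 0 never pushes
theorem lj_run0 (xs : List Int) :
    ∀ (ps : List (Int × Int)), ps.foldl (ljStep xs 0) [] = [] := by
  intro ps
  induction ps with
  | nil => rfl
  | cons p rest ih => simpa [ljStep, ljPop] using ih

-- stack elements are earlier indices
theorem lj_prefix_inv (xs : List Int) (radix : Int) :
    ∀ (m : Nat), m ≤ xs.length →
      ∀ t ∈ (PySem.List.enumerate (xs.take m) 0).foldl (ljStep xs radix) [],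
        0 ≤ t ∧ t < (m : Int) := by
  intro m
  induction m with
  | zero =>
      intro _ t ht
      simp [PySem.List.enumerate_nil] at ht
  | succ m ih =>
      intro hm t ht
      have hmlt : m < xs.length := by omega
      rw [List.take_add_one, List.getElem?_eq_getElem hmlt] at ht
      rw [PySem.List.enumerate_append] at ht
      have hlen : ((xs.take m).length : Int) = (m : Int) := by
        simp [List.length_take]; omega
      rw [hlen] at ht
      rw [List.foldl_append] at ht
      simp only [Option.toList_some, PySem.List.enumerate_cons, PySem.List.enumerate_nil,
        List.foldl_cons, List.foldl_nil] at ht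
      rw [ljStep] at ht
      have hsub := ljPop_subset xs radix (xs.length : Int) (0 + (m : Int)) xs[m]
        ((PySem.List.enumerate (xs.take m) 0).foldl (ljStep xs radix) [])
      split at ht
      · rcases List.mem_cons.mp ht with h | h
        · subst h; constructor <;> omega
        · have := ih (by omega) t (hsub t h)
          constructor <;> omega
      · have := ih (by omega) t (hsub t ht)
        constructor <;> omega

-- phase 1: processing the prefix up to and including i1 leaves exactly [i1]
theorem lj_phase1 (xs : List Int) (radix : Int) (i1 : Int) (h0 : 0 ≤ i1)
    (hlt : i1 < (xs.length : Int)) (hfeas : radix ≤ (xs.length : Int) - i1)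
    (hstrict : ∀ j, 0 ≤ j → j < i1 → ljVal xs j < ljVal xs i1) (hr : 0 < radix) :
    (PySem.List.enumerate (xs.take (i1.toNat + 1)) 0).foldl (ljStep xs radix) [] = [i1] := by
  have hmlt : i1.toNat < xs.length := by omega
  rw [List.take_add_one, List.getElem?_eq_getElem hmlt]
  rw [PySem.List.enumerate_append]
  have hlen : ((xs.take i1.toNat).length : Int) = ((i1.toNat : Nat) : Int) := by
    simp [List.length_take]; omega
  rw [hlen, List.foldl_append]
  simp only [Option.toList_some, PySem.List.enumerate_cons, PySem.List.enumerate_nil,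
    List.foldl_cons, List.foldl_nil]
  rw [ljStep]
  have hval : ljVal xs i1 = xs[i1.toNat] := by
    rw [ljVal_nonneg xs i1 h0]
    simp [List.getD_eq_getElem?_getD, List.getElem?_eq_getElem hmlt]
  have hpop : ljPop xs radix (xs.length : Int) (0 + ((i1.toNat : Nat) : Int)) xs[i1.toNat]
      ((PySem.List.enumerate (xs.take i1.toNat) 0).foldl (ljStep xs radix) []) = [] := by
    apply ljPop_all
    · omega
    · intro t htmem
      have hb := lj_prefix_inv xs radix i1.toNat (by omega) t htmem
      have := hstrict t hb.1 (by omega)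
      rw [ljVal] at this
      rw [← hval]
      exact this
  rw [hpop]
  rw [if_pos (by simp; omega)]
  have : (0 : Int) + ((i1.toNat : Nat) : Int) = i1 := by omega
  rw [this]

theorem lj_enumerate_add (xs : List Int) (s d : Int) :
    PySem.List.enumerate xs (s + d) = (PySem.List.enumerate xs s).map (fun p => (p.1 + d, p.2)) := by
  induction xs generalizing s with
  | nil => simp [PySem.List.enumerate_nil]
  | cons x t ih =>
      rw [PySem.List.enumerate_cons, PySem.List.enumerate_cons, List.map_cons]
      have : s + d + 1 = (s + 1) + d := by ring
      rw [this, ih (s + 1)]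

-- phase 2 pop simulation
theorem ljPop_sim (xs : List Int) (radix i1 : Int) (h0 : 0 ≤ i1)
    (hm : i1.toNat + 1 ≤ xs.length)
    (j v : Int) (_hj : 0 ≤ j)
    (hv : j + (i1 + 1) ≤ (xs.length : Int) - radix → v ≤ ljVal xs i1) :
    ∀ st', (∀ t ∈ st', 0 ≤ t) →
      ljPop xs radix (xs.length : Int) (j + (i1 + 1)) v
          (st'.map (· + (i1 + 1)) ++ [i1]) =
        (ljPop (xs.drop (i1.toNat + 1)) (radix - 1) ((xs.drop (i1.toNat + 1)).length : Int) j v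
            st').map (· + (i1 + 1)) ++ [i1] := by
  have hn' : ((xs.drop (i1.toNat + 1)).length : Int) = (xs.length : Int) - (i1 + 1) := by
    simp [List.length_drop]; omega
  intro st'
  induction st' with
  | nil =>
      intro _
      simp only [List.map_nil, List.nil_append]
      simp only [ljPop]
      split
      · next hcond =>
          exfalso
          obtain ⟨hlt, hfeas⟩ := hcond
          simp only [List.length_cons, List.length_nil] at hfeas
          have hle : j + (i1 + 1) ≤ (xs.length : Int) - radix := by push_cast at hfeas; omega
          have := hv hle
          rw [ljVal] at this
          omega
      · simp
  | cons t rest ih =>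
      intro hnn
      have ht0 : 0 ≤ t := hnn t (by simp)
      have hvt : PySem.List.pyGetD xs (t + (i1 + 1)) 0 =
          PySem.List.pyGetD (xs.drop (i1.toNat + 1)) t 0 := by
        have hthis := ljVal_drop xs (i1.toNat + 1) t ht0
        rw [ljVal, ljVal] at hthis
        have hcast : ((i1.toNat + 1 : Nat) : Int) = i1 + 1 := by omega
        rw [hcast] at hthis
        exact hthis.symm
      simp only [List.map_cons, List.cons_append]
      simp only [ljPop]
      by_cases hc : PySem.List.pyGetD (xs.drop (i1.toNat + 1)) t 0 < v ∧
          (((t :: rest).length : Int)) - 1 + (((xs.drop (i1.toNat + 1)).length : Int) - j) ≥ radix - 1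
      · have hbig : PySem.List.pyGetD xs (t + (i1 + 1)) 0 < v ∧
            ((((t + (i1 + 1)) :: (rest.map (· + (i1 + 1)) ++ [i1])).length : Int)) - 1 +
              ((xs.length : Int) - (j + (i1 + 1))) ≥ radix := by
          refine ⟨by rw [hvt]; exact hc.1, ?_⟩
          have h2 := hc.2
          simp only [List.length_cons, List.length_append, List.length_map,
            List.length_nil] at h2 ⊢
          push_cast at h2 ⊢
          omega
        rw [if_pos hbig, if_pos hc]
        exact ih (fun u hu => hnn u (by simp [hu]))
      · have hbig : ¬ (PySem.List.pyGetD xs (t + (i1 + 1)) 0 < v ∧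
            ((((t + (i1 + 1)) :: (rest.map (· + (i1 + 1)) ++ [i1])).length : Int)) - 1 +
              ((xs.length : Int) - (j + (i1 + 1))) ≥ radix) := by
          intro ⟨hb1, hb2⟩
          apply hc
          refine ⟨by rw [← hvt]; exact hb1, ?_⟩
          simp only [List.length_cons, List.length_append, List.length_map,
            List.length_nil] at hb2 ⊢
          push_cast at hb2 ⊢
          omega
        rw [if_neg hbig, if_neg hc]
        simp

-- phase 2 step simulation
theorem ljStep_sim (xs : List Int) (radix i1 : Int) (h0 : 0 ≤ i1)
    (hm : i1.toNat + 1 ≤ xs.length)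
    (j v : Int) (hj : 0 ≤ j)
    (hv : j + (i1 + 1) ≤ (xs.length : Int) - radix → v ≤ ljVal xs i1) :
    ∀ st', (∀ t ∈ st', 0 ≤ t) →
      ljStep xs radix (st'.map (· + (i1 + 1)) ++ [i1]) (j + (i1 + 1), v) =
        (ljStep (xs.drop (i1.toNat + 1)) (radix - 1) st' (j, v)).map (· + (i1 + 1)) ++ [i1] := by
  intro st' hnn
  rw [ljStep, ljStep]
  simp only []
  rw [ljPop_sim xs radix i1 h0 hm j v hj hv st' hnn]
  set w := ljPop (xs.drop (i1.toNat + 1)) (radix - 1) ((xs.drop (i1.toNat + 1)).length : Int) j v st'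
    with hw
  by_cases hp : ((w.length : Int)) < radix - 1
  · rw [if_pos (by simp; omega), if_pos hp]
    simp
  · rw [if_neg (by simp; omega), if_neg hp]

-- phase 2 run simulation over the suffix
theorem lj_phase2 (xs : List Int) (radix i1 : Int) (h0 : 0 ≤ i1)
    (hm : i1.toNat + 1 ≤ xs.length)
    (hmax : ∀ j, 0 ≤ j → j ≤ (xs.length : Int) - radix → ljVal xs j ≤ ljVal xs i1) :
    (PySem.List.enumerate (xs.drop (i1.toNat + 1)) ((i1.toNat : Int) + 1)).foldl
        (ljStep xs radix) [i1] =
      ((PySem.List.enumerate (xs.drop (i1.toNat + 1)) 0).foldl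
          (ljStep (xs.drop (i1.toNat + 1)) (radix - 1)) []).map (· + (i1 + 1)) ++ [i1] := by
  have henum : PySem.List.enumerate (xs.drop (i1.toNat + 1)) ((i1.toNat : Int) + 1) =
      (PySem.List.enumerate (xs.drop (i1.toNat + 1)) 0).map (fun p => (p.1 + (i1 + 1), p.2)) := by
    have h1 : ((i1.toNat : Int)) + 1 = 0 + (i1 + 1) := by omega
    rw [h1, lj_enumerate_add]
  rw [henum, List.foldl_map]
  have main : ∀ (ps : List (Int × Int)) (st' : List Int),
      (∀ p ∈ ps, 0 ≤ p.1 ∧ p.2 = ljVal (xs.drop (i1.toNat + 1)) p.1) →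
      (∀ t ∈ st', 0 ≤ t) →
      ps.foldl (fun st p => ljStep xs radix st (p.1 + (i1 + 1), p.2))
          (st'.map (· + (i1 + 1)) ++ [i1]) =
        (ps.foldl (ljStep (xs.drop (i1.toNat + 1)) (radix - 1)) st').map (· + (i1 + 1)) ++ [i1] := by
    intro ps
    induction ps with
    | nil => intro st' _ _; rfl
    | cons p rest ih =>
        intro st' hps hst
        have hp := hps p (by simp)
        have hv : p.1 + (i1 + 1) ≤ (xs.length : Int) - radix → p.2 ≤ ljVal xs i1 := by
          intro hle
          have hvx : p.2 = ljVal xs (p.1 + (i1 + 1)) := by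
            rw [hp.2, ljVal_drop xs (i1.toNat + 1) p.1 hp.1]
            congr 1
            omega
          rw [hvx]
          exact hmax (p.1 + (i1 + 1)) (by omega) hle
        simp only [List.foldl_cons]
        have hstep := ljStep_sim xs radix i1 h0 hm p.1 p.2 hp.1 hv st' hst
        rw [hstep]
        apply ih
        · intro q hq; exact hps q (by simp [hq])
        · intro t ht
          rw [ljStep] at ht
          have hsub := ljPop_subset (xs.drop (i1.toNat + 1)) (radix - 1)
            ((xs.drop (i1.toNat + 1)).length : Int) p.1 p.2 st'
          split at ht
          · rcases List.mem_cons.mp ht with h | h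
            · subst h; exact hp.1
            · exact hst t (hsub t h)
          · exact hst t (hsub t ht)
  have hnilmap : ([] : List Int).map (· + (i1 + 1)) ++ [i1] = [i1] := by simp
  rw [← hnilmap]
  apply main
  · intro p hp
    rcases (PySem.List.mem_enumerate_iff _ _ _).mp hp with ⟨k, hk, hpk⟩
    subst hpk
    refine ⟨by omega, ?_⟩
    simp only [zero_add]
    rw [ljVal_nonneg _ _ (by omega)]
    simp [List.getD_eq_getElem?_getD, List.getElem?_eq_getElem hk]
  · intro t ht; simp at ht

-- the stack run produces exactly the reversed greedy selection
theorem lj_stack_eq_gsel (xs : List Int) (radix : Int) (h0 : 0 ≤ radix)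
    (h1 : radix ≤ (xs.length : Int)) :
    (PySem.List.enumerate xs 0).foldl (ljStep xs radix) [] =
      (gsel xs radix.toNat 0).reverse := by
  suffices H : ∀ (k : Nat) (xs : List Int) (radix : Int), radix.toNat = k → 0 ≤ radix →
      radix ≤ (xs.length : Int) →
      (PySem.List.enumerate xs 0).foldl (ljStep xs radix) [] = (gsel xs k 0).reverse by
    exact H radix.toNat xs radix rfl h0 h1
  intro k
  induction k with
  | zero =>
      intro xs radix hk h0 h1
      have : radix = 0 := by omega
      subst this
      rw [lj_run0]
      rfl
  | succ k ih =>
      intro xs radix hk h0 h1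
      have hkr : (k : Int) = radix - 1 := by omega
      set i1 := ljScan xs 0 ((xs.length : Int) - k) with hi1def
      obtain ⟨⟨hge, hpos⟩, hmax, hstrict⟩ := ljScan_inv xs 0 ((xs.length : Int) - k)
      have hub : i1 ≤ (xs.length : Int) - radix := by
        rcases hpos with h | h
        · omega
        · omega
      have hm : i1.toNat + 1 ≤ xs.length := by omega
      -- split the enumeration at i1 + 1
      have hsplit : PySem.List.enumerate xs 0 =
          PySem.List.enumerate (xs.take (i1.toNat + 1)) 0 ++
            PySem.List.enumerate (xs.drop (i1.toNat + 1)) (0 + ((xs.take (i1.toNat + 1)).length : Int)) := by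
        conv_lhs => rw [← List.take_append_drop (i1.toNat + 1) xs]
        rw [PySem.List.enumerate_append]
      have hlen : ((xs.take (i1.toNat + 1)).length : Int) = (i1.toNat : Int) + 1 := by
        simp [List.length_take]; omega
      rw [hsplit, List.foldl_append]
      rw [lj_phase1 xs radix i1 hge (by omega) (by omega) hstrict (by omega)]
      have hstart : (0 : Int) + ((xs.take (i1.toNat + 1)).length : Int) = (i1.toNat : Int) + 1 := by
        omega
      rw [hstart]
      rw [lj_phase2 xs radix i1 hge hm (by intro j hj hjle; exact hmax j hj (by omega))]
      rw [ih (xs.drop (i1.toNat + 1)) (radix - 1) (by omega) (by omega)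
        (by simp [List.length_drop]; omega)]
      -- right-hand side
      rw [gsel]
      simp only [← hi1def]
      rw [List.reverse_cons]
      have hshift : gsel xs k (i1 + 1) = (gsel (xs.drop (i1.toNat + 1)) k 0).map (· + (i1 + 1)) := by
        have hcast : ((i1.toNat + 1 : Nat) : Int) = i1 + 1 := by omega
        have h01 : i1 + 1 = 0 + ((i1.toNat + 1 : Nat) : Int) := by omega
        rw [h01, gsel_shift xs (i1.toNat + 1) hm k 0 le_rfl, hcast]
        simp
      rw [hshift, List.map_reverse]

-- indexing a reversed list
theorem lj_pyGetD_reverse (l : List Int) (r d : Int) (h0 : 0 ≤ r) (h : r < (l.length : Int)) :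
    PySem.List.pyGetD l.reverse r d = PySem.List.pyGetD l ((l.length : Int) - 1 - r) d := by
  rw [PySem.List.pyGetD_eq_getElem (xs := l.reverse) d (by simpa using h0) (by simp; omega),
      PySem.List.pyGetD_eq_getElem (xs := l) d (by omega) (by omega)]
  rw [List.getElem_reverse]
  congr 1
  omega

-- ports as weightings of the common selection
theorem largest_joltage_eq (joltages : List Int) (radix : Int) :
    largest_joltage joltages radix =
      (PySem.List.pyRange 0 radix 1).foldl (fun acc r =>
        acc + PySem.List.pyGetD joltages
          (PySem.List.pyGetD (gsel joltages radix.toNat 0).reverse r 0) 0 * 10 ^ r.toNat) 0 := by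
  rw [largest_joltage, lj_msFinal]

theorem largest_joltage_alt_eq (joltages : List Int) (radix : Int) (h0 : 0 ≤ radix)
    (h : radix ≤ (joltages.length : Int)) :
    largest_joltage_alt joltages radix =
      (PySem.List.pyRange 0 radix 1).foldl (fun acc r =>
        acc + PySem.List.pyGetD joltages
          (PySem.List.pyGetD (gsel joltages radix.toNat 0) (radix - 1 - r) 0) 0 * 10 ^ r.toNat) 0 := by
  rw [largest_joltage_alt, lj_stack_eq_gsel joltages radix h0 h, List.reverse_reverse]

-- ===== VERDICT (by name: the statement is the Claim_ definition above) =====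
theorem largest_joltage_spec : Claim_equal_largest_joltage := by
  intro joltages radix _ hpre
  have hpre' : radix ≤ (joltages.length : Int) := hpre
  show largest_joltage joltages radix = largest_joltage_alt joltages radix
  by_cases h0 : 0 ≤ radix
  · rw [largest_joltage_eq, largest_joltage_alt_eq joltages radix h0 hpre']
    apply PySem.List.foldl_congr_mem
    intro acc r hr
    have hrb := (PySem.List.mem_pyRange_one).mp hr
    have hlen : ((gsel joltages radix.toNat 0).length : Int) = radix := by
      rw [gsel_length]; omega
    rw [lj_pyGetD_reverse _ _ 0 (by omega) (by omega)]
    rw [hlen]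
  · rw [largest_joltage, largest_joltage_alt]
    rw [PySem.List.pyRange_one_eq_nil (by omega)]
    rfl
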